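-- pv_equiv track=rewrite | github.com/Wikidata/soweego | soweego/target_selection/common/matching_strategies.py | _build_index_query
-- ===== SOURCE A (Python) =====
-- from collections import defaultdict
--
-- def _build_index_query(source_strings):
--     query = ''
--     frequencies = defaultdict(list)
--     for label, languages in source_strings.items():
--         frequencies[len(languages)].append(label)
--     most_frequent = frequencies[max(frequencies.keys())]
--     for label in most_frequent:
--         # TODO experiment with different strategies
--         query += '"%s" ' % label.replace("'", "\\'")
--     return query.rstrip(), most_frequent
-- ===== SOURCE B (Python) =====
-- # B: no defaultdict grouping — one max over the value-list lengths, then a single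
-- # insertion-order filter pass and a ' '.join (simpler decomposition, same values).
-- def _build_index_query(source_strings):
--     max_count = max(len(languages) for languages in source_strings.values())
--     most_frequent = [label for label, languages in source_strings.items()
--                      if len(languages) == max_count]
--     query = ' '.join('"%s"' % label.replace("'", "\\'") for label in most_frequent)
--     return query, most_frequent
-- ===== Notes on version B (the rewrite author's own statement) =====
-- stated objective: simpler
-- what changed: Drops the defaultdict grouping-by-frequency dict entirely: B takes one max over the lengths of the value lists, selects the most-frequent labels with a single insertion-order filter pass, and builds the query with ' '.join instead of repeated concatenation plus rstrip.
import Mathlib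
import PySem

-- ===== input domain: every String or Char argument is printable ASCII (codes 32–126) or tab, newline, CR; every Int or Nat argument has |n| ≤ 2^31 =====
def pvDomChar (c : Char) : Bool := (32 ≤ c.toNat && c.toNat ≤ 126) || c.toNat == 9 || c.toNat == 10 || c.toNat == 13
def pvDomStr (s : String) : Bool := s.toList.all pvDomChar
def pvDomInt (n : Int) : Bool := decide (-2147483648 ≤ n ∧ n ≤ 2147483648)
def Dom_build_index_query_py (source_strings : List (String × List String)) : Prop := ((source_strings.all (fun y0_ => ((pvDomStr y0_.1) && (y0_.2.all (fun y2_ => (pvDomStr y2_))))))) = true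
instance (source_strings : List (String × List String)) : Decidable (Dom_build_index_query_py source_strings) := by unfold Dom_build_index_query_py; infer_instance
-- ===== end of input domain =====

-- B drops A's defaultdict grouping: one max over value-list lengths, one insertion-order
-- filter pass, and ' '.join instead of repeated concatenation + rstrip (objective: simpler).

-- ===== PORT A =====
def build_index_query_py (source_strings : List (String × List String)) : String × List String :=
  let frequencies : PySem.Dict Int (List String) :=
    source_strings.foldl
      (fun d p => d.modify ((p.2.length : Int)) [] (fun ls => ls ++ [p.1]))
      PySem.Dict.empty
  match PySem.List.max? frequencies.keys (fun k => k) with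
  | none => ("", [])  -- max() raises ValueError here (empty dict); excluded by Pre_
  | some mk =>
    let most_frequent := frequencies.getD mk []
    let query := most_frequent.foldl
      (fun q label => q ++ "\"" ++ PySem.Str.replace label "'" "\\'" ++ "\" ") ""
    (PySem.Str.rstrip query, most_frequent)

-- ===== PORT B =====
def build_index_query_py_alt (source_strings : List (String × List String)) : String × List String :=
  match PySem.List.max? (source_strings.map (fun p => ((p.2.length : Int)))) (fun k => k) with
  | none => ("", [])  -- max() raises ValueError here (empty dict); excluded by Pre_
  | some max_count =>
    let most_frequent :=
      (source_strings.filter (fun p => ((p.2.length : Int)) == max_count)).map (fun p => p.1)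
    (PySem.Str.join " "
      (most_frequent.map (fun label => "\"" ++ PySem.Str.replace label "'" "\\'" ++ "\"")),
     most_frequent)

-- ===== PRECONDITION & SPEC =====
-- Pre_ excludes the empty dict, on which both Pythons raise ValueError (max of an empty
-- sequence); the Nodup conjunct only states that the association list represents a dict
-- (a Python dict's keys are unique by construction, so no dict input is excluded).
def Pre_build_index_query_py (source_strings : List (String × List String)) : Prop :=
  source_strings ≠ [] ∧ (source_strings.map (fun p => p.1)).Nodup
instance (source_strings : List (String × List String)) : Decidable (Pre_build_index_query_py source_strings) := by unfold Pre_build_index_query_py; infer_instance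

def pvWitness_build_index_query_py : (List (String × List String)) :=
  [("it's", ["en", "fr"]), ("b", ["en"]), ("c", ["de", "es"])]

def Spec_build_index_query_py (source_strings : List (String × List String)) (out : String × List String) : Prop := out = build_index_query_py_alt source_strings
instance (source_strings : List (String × List String)) (out : String × List String) : Decidable (Spec_build_index_query_py source_strings out) := by unfold Spec_build_index_query_py; infer_instance

-- ===== CLAIM (what is proved, stated in full; the proofs are below) =====
def Claim_equal_build_index_query_py : Prop := ∀ (source_strings : List (String × List String)), Dom_build_index_query_py source_strings → Pre_build_index_query_py source_strings → Spec_build_index_query_py source_strings (build_index_query_py source_strings)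

-- ===== LEMMAS AND PROOFS =====

-- max with the identity key is determined by membership alone
theorem pv_max?_id_congr (xs ys : List Int) (h : ∀ a : Int, a ∈ xs ↔ a ∈ ys) :
    PySem.List.max? xs (fun k => k) = PySem.List.max? ys (fun k => k) := by
  cases hx : PySem.List.max? xs (fun k => k) with
  | none =>
    rw [PySem.List.max?_eq_none_iff] at hx
    subst hx
    rw [Eq.comm, PySem.List.max?_eq_none_iff]
    cases ys with
    | nil => rfl
    | cons y t => exact absurd ((h y).mpr (List.mem_cons_self)) (by simp)
  | some m =>
    cases hy : PySem.List.max? ys (fun k => k) with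
    | none =>
      rw [PySem.List.max?_eq_none_iff] at hy
      subst hy
      exact absurd ((h m).mp (PySem.List.max?_mem hx)) (by simp)
    | some m' =>
      have h1 : m ≤ m' := PySem.List.max?_isMax hy m ((h m).mp (PySem.List.max?_mem hx))
      have h2 : m' ≤ m := PySem.List.max?_isMax hx m' ((h m').mpr (PySem.List.max?_mem hy))
      exact congrArg some (le_antisymm h1 h2)

-- the accumulator loop building the query, read off as a flatMap on char lists
theorem pv_fold_query_toList (rl : String → String) :
    ∀ (L : List String) (acc : String),
      (L.foldl (fun q label => q ++ "\"" ++ rl label ++ "\" ") acc).toList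
        = acc.toList ++ L.flatMap (fun label => '"' :: (rl label).toList ++ ['"', ' ']) := by
  intro L
  induction L with
  | nil => intro acc; simp
  | cons x t ih =>
    intro acc
    simp only [List.foldl_cons, List.flatMap_cons, ih]
    simp

-- rstrip of the space-terminated concatenation equals the ' '-join of the quoted pieces
theorem pv_rstrip_join (rl : String → String) :
    ∀ (L : List String) (x : String),
      PySem.Chars.rstrip ((x :: L).flatMap (fun label => '"' :: (rl label).toList ++ ['"', ' ']))
        = PySem.Chars.join [' ']
            ((x :: L).map (fun label => '"' :: (rl label).toList ++ ['"'])) := by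
  intro L
  induction L with
  | nil =>
    intro x
    simp only [List.flatMap_cons, List.flatMap_nil, List.append_nil, List.map_cons,
      List.map_nil, PySem.Chars.rstrip]
    rw [show (('"' :: (rl x).toList ++ ['"', ' ']).reverse)
        = ' ' :: '"' :: (rl x).toList.reverse ++ ['"'] by simp]
    rw [show List.dropWhile PySem.Chars.isspace (' ' :: '"' :: (rl x).toList.reverse ++ ['"'])
        = '"' :: (rl x).toList.reverse ++ ['"'] by simp [List.dropWhile, PySem.Chars.isspace]]
    simp [PySem.Chars.join, List.intercalate]
  | cons y t ih =>
    intro x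
    have hih := ih y
    have hne : PySem.Chars.join [' ']
        ((y :: t).map (fun label => '"' :: (rl label).toList ++ ['"'])) ≠ [] := by
      cases t with
      | nil => simp [PySem.Chars.join, List.intercalate]
      | cons z r => rw [List.map_cons, List.map_cons, PySem.Chars.join_cons_cons]; simp
    -- split the flatMap of the cons and distribute rstrip over the prefix
    rw [List.flatMap_cons]
    have hd : ¬ (List.dropWhile PySem.Chars.isspace
        (((y :: t).flatMap (fun label => '"' :: (rl label).toList ++ ['"', ' '])).reverse)).isEmpty = true := by
      intro hemp
      apply hne
      rw [← hih]
      unfold PySem.Chars.rstrip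
      simp only [List.isEmpty_iff] at hemp
      rw [hemp]; rfl
    have : PySem.Chars.rstrip
        (('"' :: (rl x).toList ++ ['"', ' ']) ++ (y :: t).flatMap (fun label => '"' :: (rl label).toList ++ ['"', ' ']))
        = ('"' :: (rl x).toList ++ ['"', ' ']) ++ PySem.Chars.rstrip
            ((y :: t).flatMap (fun label => '"' :: (rl label).toList ++ ['"', ' '])) := by
      unfold PySem.Chars.rstrip
      rw [List.reverse_append, List.dropWhile_append, if_neg hd]
      simp
    rw [this, hih]
    simp only [List.map_cons]
    rw [PySem.Chars.join_cons_cons]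
    simp

-- the whole string computation, at String level
theorem pv_query_eq (rl : String → String) (L : List String) (x : String) :
    PySem.Str.rstrip ((x :: L).foldl (fun q label => q ++ "\"" ++ rl label ++ "\" ") "")
      = PySem.Str.join " " ((x :: L).map (fun label => "\"" ++ rl label ++ "\"")) := by
  apply String.toList_inj.mp
  rw [PySem.Str.toList_rstrip, pv_fold_query_toList, PySem.Str.toList_join]
  have h1 : ((x :: L).map (fun label => "\"" ++ rl label ++ "\"")).map String.toList
      = (x :: L).map (fun label => '"' :: (rl label).toList ++ ['"']) := by
    rw [List.map_map]; apply List.map_congr_left; intro a _; simp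
  rw [h1]
  have h2 : (" " : String).toList = [' '] := rfl
  rw [h2]
  simpa using pv_rstrip_join rl L x

-- the grouping dict looked up at any key is the insertion-order filter of the labels
theorem pv_getD_group (source_strings : List (String × List String)) (mk : Int) :
    (source_strings.foldl
      (fun d p => d.modify ((p.2.length : Int)) [] (fun ls => ls ++ [p.1]))
      PySem.Dict.empty).getD mk []
    = (source_strings.filter (fun p => ((p.2.length : Int)) == mk)).map (fun p => p.1) := by
  have h : source_strings.foldl
      (fun d p => d.modify ((p.2.length : Int)) [] (fun ls => ls ++ [p.1]))
      (PySem.Dict.empty : PySem.Dict Int (List String))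
      = (source_strings.map (fun p => (((p.2.length : Int)), p.1))).foldl
          (fun d q => d.modify q.1 [] (fun ls => ls ++ [q.2])) PySem.Dict.empty := by
    rw [List.foldl_map]
  rw [h, PySem.Dict.getD_foldl_modify_append, List.filter_map, List.map_map]
  simp [Function.comp_def]

-- keys of the grouping dict have the same members as the list of lengths
theorem pv_keys_group (source_strings : List (String × List String)) (a : Int) :
    a ∈ (source_strings.foldl
      (fun d p => d.modify ((p.2.length : Int)) [] (fun ls => ls ++ [p.1]))
      PySem.Dict.empty).keys
    ↔ a ∈ source_strings.map (fun p => ((p.2.length : Int))) := by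
  rw [PySem.Dict.keys_foldl_modify_key source_strings (fun p => ((p.2.length : Int))) []
    (fun _ p => fun ls => ls ++ [p.1]) PySem.Dict.empty]
  simp [PySem.Dict.keys_empty]

-- ===== VERDICT (by name: the statement is the Claim_ definition above) =====
theorem build_index_query_py_spec : Claim_equal_build_index_query_py := by
  intro src _ _
  unfold Spec_build_index_query_py build_index_query_py build_index_query_py_alt
  have hmax : PySem.List.max? (src.foldl
      (fun d p => d.modify ((p.2.length : Int)) [] (fun ls => ls ++ [p.1]))
      PySem.Dict.empty).keys (fun k => k)
      = PySem.List.max? (src.map (fun p => ((p.2.length : Int)))) (fun k => k) :=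
    pv_max?_id_congr _ _ (pv_keys_group src)
  simp only [hmax]
  cases hm : PySem.List.max? (src.map (fun p => ((p.2.length : Int)))) (fun k => k) with
  | none =>
    -- rewriting hm to src = [] lets the goal close definitionally (both arms are ("", []))
    rw [PySem.List.max?_eq_none_iff, List.map_eq_nil_iff] at hm
  | some mk =>
    simp only [pv_getD_group src mk]
    have hmem : mk ∈ src.map (fun p => ((p.2.length : Int))) := PySem.List.max?_mem hm
    obtain ⟨p, hp, hpl⟩ := List.mem_map.mp hmem
    have hmfne : (src.filter (fun p => ((p.2.length : Int)) == mk)).map (fun p => p.1) ≠ [] := by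
      simp only [ne_eq, List.map_eq_nil_iff, List.filter_eq_nil_iff, not_forall]
      exact ⟨p, hp, by simp [hpl]⟩
    obtain ⟨x, L, hxl⟩ := List.exists_cons_of_ne_nil hmfne
    rw [hxl]
    exact Prod.ext (pv_query_eq (fun l => PySem.Str.replace l "'" "\\'") L x) rfl
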